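-- pv_equiv track=rewrite | github.com/bitwisecook/tcl-lsp | core/minifier/static_substr.py | _tcl_list_element
-- ===== SOURCE A (Python) =====
-- _TCL_LIST_SPECIAL = frozenset(' \t\n"{}[]$;\\')
--
-- def _tcl_list_element(value: str) -> str:
--     """Quote *value* as a canonical Tcl list element.
--
--     Bare words are returned as-is.  Values containing Tcl special
--     characters are brace-quoted when safe, otherwise backslash-escaped.
--     """
--     if not value:
--         return "{}"
--     if not any(ch in _TCL_LIST_SPECIAL for ch in value):
--         return value
--     # Brace-quoting is safe when braces are properly nested and no backslash.
--     if "\\" not in value and _braces_balanced(value):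
--         return "{" + value + "}"
--     # Fallback: backslash-escape special characters.
--     out: list[str] = []
--     for ch in value:
--         if ch in _TCL_LIST_SPECIAL:
--             out.append("\\" + ch)
--         else:
--             out.append(ch)
--     return "".join(out)
--
-- def _braces_balanced(text: str) -> bool:
--     """Return True if braces in *text* are properly nested (depth never goes negative)."""
--     depth = 0
--     for ch in text:
--         if ch == "{":
--             depth += 1
--         elif ch == "}":
--             depth -= 1
--             if depth < 0:
--                 return False
--     return depth == 0
-- ===== SOURCE B (Python) =====
-- _TCL_LIST_SPECIAL = frozenset(' \t\n"{}[]$;\\')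
--
-- def _tcl_list_element(value: str) -> str:
--     """Quote *value* as a canonical Tcl list element (single-pass classifier)."""
--     if not value:
--         return "{}"
--     has_special = False
--     has_backslash = False
--     depth = 0
--     balanced = True
--     for ch in value:
--         if ch in _TCL_LIST_SPECIAL:
--             has_special = True
--         if ch == "\\":
--             has_backslash = True
--         elif ch == "{":
--             depth += 1
--         elif ch == "}":
--             depth -= 1
--             if depth < 0:
--                 balanced = False
--     if not has_special:
--         return value
--     if not has_backslash and balanced and depth == 0:
--         return "{" + value + "}"
--     return "".join("\\" + ch if ch in _TCL_LIST_SPECIAL else ch for ch in value)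
-- ===== Notes on version B (the rewrite author's own statement) =====
-- stated objective: alternative
-- what changed: Replaces A's three separate short-circuiting scans (the any() special-char test, the backslash membership test, and the _braces_balanced helper) with one fused pass accumulating has_special/has_backslash/depth/balanced flags, then the same decision tree; the escape fallback is a single join over a comprehension instead of an explicit accumulator loop.
import Mathlib
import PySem

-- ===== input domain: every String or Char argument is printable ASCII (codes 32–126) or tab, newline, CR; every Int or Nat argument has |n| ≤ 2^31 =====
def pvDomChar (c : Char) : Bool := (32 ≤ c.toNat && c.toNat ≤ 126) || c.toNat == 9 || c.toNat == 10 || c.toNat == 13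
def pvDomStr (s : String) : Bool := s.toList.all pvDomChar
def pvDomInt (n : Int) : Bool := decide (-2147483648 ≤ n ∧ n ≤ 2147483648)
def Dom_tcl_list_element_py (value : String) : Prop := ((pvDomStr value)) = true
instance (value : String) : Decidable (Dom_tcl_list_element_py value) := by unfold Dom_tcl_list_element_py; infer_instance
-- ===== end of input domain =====

-- B fuses A's three separate scans (any special, backslash membership, the _braces_balanced
-- helper) into one pass over the string accumulating four flags; same decision tree after it.

-- membership in _TCL_LIST_SPECIAL
def tclSpecial (c : Char) : Bool :=
  [' ', '\t', '\n', '"', '{', '}', '[', ']', '$', ';', '\\'].contains c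

-- ===== PORT A =====
-- _braces_balanced: depth counter with early False on negative depth
def bracesBalancedAux : List Char → Int → Bool
  | [], depth => depth == 0
  | c :: cs, depth =>
    if c = '{' then bracesBalancedAux cs (depth + 1)
    else if c = '}' then
      if depth - 1 < 0 then false else bracesBalancedAux cs (depth - 1)
    else bracesBalancedAux cs depth

def tcl_list_element_py (value : String) : String :=
  if value.toList = [] then "{}"
  else if ¬ (value.toList.any tclSpecial) then value
  else if ¬ (value.toList.contains '\\') ∧ bracesBalancedAux value.toList 0 then
    String.ofList ('{' :: value.toList ++ ['}'])
  else
    -- out accumulator loop, then "".join(out)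
    String.ofList (value.toList.foldl
      (fun acc c => acc ++ (if tclSpecial c then ['\\', c] else [c])) [])

-- ===== PORT B =====
-- one fused scan: (has_special, has_backslash, depth, balanced)
def tclScan : List Char → Bool → Bool → Int → Bool → Bool × Bool × Int × Bool
  | [], hs, hb, depth, bal => (hs, hb, depth, bal)
  | c :: cs, hs, hb, depth, bal =>
    let hs := hs || tclSpecial c
    if c = '\\' then tclScan cs hs true depth bal
    else if c = '{' then tclScan cs hs hb (depth + 1) bal
    else if c = '}' then tclScan cs hs hb (depth - 1) (bal && !(depth - 1 < 0))
    else tclScan cs hs hb depth bal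

def tcl_list_element_py_alt (value : String) : String :=
  if value.toList = [] then "{}"
  else
    let r := tclScan value.toList false false 0 true
    if ¬ r.1 then value
    else if ¬ r.2.1 ∧ r.2.2.2 ∧ r.2.2.1 = 0 then String.ofList ('{' :: value.toList ++ ['}'])
    else String.ofList ((value.toList.map (fun c => if tclSpecial c then ['\\', c] else [c])).flatten)

-- ===== PRECONDITION & SPEC =====
def Spec_tcl_list_element_py (value : String) (out : String) : Prop := out = tcl_list_element_py_alt value
instance (value : String) (out : String) : Decidable (Spec_tcl_list_element_py value out) := by unfold Spec_tcl_list_element_py; infer_instance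

-- ===== CLAIM (what is proved, stated in full; the proofs are below) =====
def Claim_equal_tcl_list_element_py : Prop := ∀ (value : String), Dom_tcl_list_element_py value → Spec_tcl_list_element_py value (tcl_list_element_py value)

-- ===== LEMMAS AND PROOFS =====

-- pure final depth of the brace counter
def tclDepth : List Char → Int → Int
  | [], d => d
  | c :: cs, d =>
    if c = '{' then tclDepth cs (d + 1)
    else if c = '}' then tclDepth cs (d - 1)
    else tclDepth cs d

-- "depth never went negative" flag
def tclBal : List Char → Int → Bool
  | [], _ => true
  | c :: cs, d =>
    if c = '{' then tclBal cs (d + 1)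
    else if c = '}' then (!(d - 1 < 0)) && tclBal cs (d - 1)
    else tclBal cs d

theorem tclScan_eq (cs : List Char) : ∀ (hs hb : Bool) (d : Int) (bal : Bool),
    tclScan cs hs hb d bal =
      (hs || cs.any tclSpecial, hb || cs.contains '\\', tclDepth cs d, bal && tclBal cs d) := by
  induction cs with
  | nil => intro hs hb d bal; simp [tclScan, tclDepth, tclBal]
  | cons c cs ih =>
    intro hs hb d bal
    simp only [tclScan, tclDepth, tclBal]
    by_cases hbs : c = '\\'
    · subst hbs
      simp [ih, tclSpecial]
    · by_cases hob : c = '{'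
      · subst hob
        simp [ih, tclSpecial, List.any_cons, hbs]
      · by_cases hcb : c = '}'
        · subst hcb
          simp [ih, tclSpecial, List.any_cons, hbs, Bool.and_assoc]
        · simp only [if_neg hbs, if_neg hob, if_neg hcb, ih]
          simp [List.any_cons, Ne.symm hbs, Bool.or_assoc]

theorem bracesBalancedAux_eq (cs : List Char) : ∀ d : Int,
    bracesBalancedAux cs d = (tclBal cs d && (tclDepth cs d == 0)) := by
  induction cs with
  | nil => intro d; simp [bracesBalancedAux, tclBal, tclDepth]
  | cons c cs ih =>
    intro d
    simp only [bracesBalancedAux, tclBal, tclDepth]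
    split_ifs with h1 h2 h3
    · exact ih _
    · simp [h3]
    · simp [ih, h3]
    · exact ih _

theorem foldl_escape (cs : List Char) :
    cs.foldl (fun acc c => acc ++ (if tclSpecial c then ['\\', c] else [c])) [] =
      (cs.map (fun c => if tclSpecial c then ['\\', c] else [c])).flatten := by
  have h := PySem.List.foldl_append_eq_flatMap (g := fun c => if tclSpecial c then ['\\', c] else [c]) (l := cs) (acc := [])
  rw [h]; simp [List.flatMap]

-- ===== VERDICT (by name: the statement is the Claim_ definition above) =====
theorem tcl_list_element_py_spec : Claim_equal_tcl_list_element_py := by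
  intro value _
  unfold Spec_tcl_list_element_py tcl_list_element_py tcl_list_element_py_alt
  by_cases hnil : value.toList = []
  · simp [hnil]
  · simp only [if_neg hnil, tclScan_eq, Bool.false_or, Bool.true_and,
      bracesBalancedAux_eq, foldl_escape]
    by_cases hs : value.toList.any tclSpecial
    · by_cases hb : value.toList.contains '\\'
      · simp [hs]
      · by_cases hbal : tclBal value.toList 0
        · by_cases hd : tclDepth value.toList 0 = 0
          · simp [hs, hbal, hd]
          · simp [hs, hbal, hd]
        · simp [hs, hbal]
    · simp [hs]
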